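-- pv_equiv track=rewrite | github.com/IkeYeek/My-codingame-solutions | easy/ghost-legs.py | make_connections
-- ===== SOURCE A (Python) =====
-- def make_connections(line, points):
--     connections = []
--     curr_point = -1
--     skip = False
--     for c in line:
--         if c is "|":
--             curr_point += 1
--             skip = False
--         elif c is "-" and not skip:
--             connections.append([points[curr_point], points[curr_point+1]])
--             skip = True
--     return connections
-- ===== SOURCE B (Python) =====
-- def make_connections(line, points):
--     return [[points[j - 1], points[j]]
--             for j, seg in enumerate(line.split('|')) if '-' in seg]
-- ===== Notes on version B (the rewrite author's own statement) =====
-- stated objective: idiomatic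
-- what changed: Replaces A's stateful char-by-char scan (curr_point counter + skip flag) with a one-line split('|')-then-enumerate comprehension that emits [points[j-1], points[j]] for every segment containing '-'.
import Mathlib
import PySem

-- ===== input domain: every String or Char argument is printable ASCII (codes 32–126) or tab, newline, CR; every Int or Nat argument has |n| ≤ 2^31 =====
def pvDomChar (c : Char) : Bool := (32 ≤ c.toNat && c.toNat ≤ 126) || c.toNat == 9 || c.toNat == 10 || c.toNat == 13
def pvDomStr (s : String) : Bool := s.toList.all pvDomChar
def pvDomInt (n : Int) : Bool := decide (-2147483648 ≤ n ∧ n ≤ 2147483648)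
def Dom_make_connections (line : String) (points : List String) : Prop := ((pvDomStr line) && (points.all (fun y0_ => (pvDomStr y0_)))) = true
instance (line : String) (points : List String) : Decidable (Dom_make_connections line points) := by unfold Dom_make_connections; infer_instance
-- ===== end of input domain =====

-- B replaces A's stateful char-by-char scan (curr_point counter + skip flag) with an
-- idiomatic split('|')-then-enumerate comprehension; equivalence of return values is proved.

-- ===== PORT A =====
-- one step of A's for-loop over the characters of line; state = (connections, curr_point, skip)
def stepA (points : List String) (st : List (List String) × Int × Bool) (c : Char) :
    List (List String) × Int × Bool :=
  let connections := st.1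
  let curr_point := st.2.1
  let skip := st.2.2
  if c = '|' then (connections, curr_point + 1, false)
  else if c = '-' ∧ skip = false then
    (connections ++ [[PySem.List.pyGetD points curr_point "",
                      PySem.List.pyGetD points (curr_point + 1) ""]], curr_point, true)
  else st
-- points[i] is ported as pyGetD … "" : exact on Pre_ (indices in range); out-of-range (IndexError) inputs are excluded by Pre_

def make_connections (line : String) (points : List String) : List (List String) :=
  (line.toList.foldl (stepA points) ([], -1, false)).1

-- ===== PORT B =====
def make_connections_alt (line : String) (points : List String) : List (List String) :=
  ((PySem.List.enumerate (PySem.Chars.splitOn line.toList ['|']) 0).filter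
      (fun p => PySem.Chars.isIn ['-'] p.2)).map
    (fun p => [PySem.List.pyGetD points (p.1 - 1) "", PySem.List.pyGetD points p.1 ""])

-- ===== PRECONDITION & SPEC =====
-- Pre_ excludes exactly the inputs on which Python A raises IndexError: a '-' appearing
-- after j bars needs points[j-1] and points[j] to exist (j = 0 uses Python's points[-1]).
def Pre_make_connections (line : String) (points : List String) : Prop :=
  ∀ j < (PySem.Chars.splitOn line.toList ['|']).length,
    '-' ∈ (PySem.Chars.splitOn line.toList ['|']).getD j [] → j < points.length
instance (line : String) (points : List String) : Decidable (Pre_make_connections line points) := by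
  unfold Pre_make_connections; infer_instance

def pvWitness_make_connections : String × List String := ("-|-", ["a", "b"])

def Spec_make_connections (line : String) (points : List String) (out : List (List String)) : Prop := out = make_connections_alt line points
instance (line : String) (points : List String) (out : List (List String)) : Decidable (Spec_make_connections line points out) := by unfold Spec_make_connections; infer_instance

-- ===== CLAIM (what is proved, stated in full; the proofs are below) =====
def Claim_equal_make_connections : Prop := ∀ (line : String) (points : List String), Dom_make_connections line points → Pre_make_connections line points → Spec_make_connections line points (make_connections line points)

-- ===== LEMMAS AND PROOFS =====

-- the connection pair recorded when curr_point = cp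
def pairAt (points : List String) (cp : Int) : List String :=
  [PySem.List.pyGetD points cp "", PySem.List.pyGetD points (cp + 1) ""]

-- characterisation of A's remaining loop from state (cp, skip)
def KA (points : List String) : List Char → Int → Bool → List (List String)
  | [], _, _ => []
  | c :: cs, cp, skip =>
    if c = '|' then KA points cs (cp + 1) false
    else if c = '-' ∧ skip = false then pairAt points cp :: KA points cs cp true
    else KA points cs cp skip

-- per-segment characterisation shared by both sides
def MS (points : List String) : List (List Char) → Int → Bool → List (List String)
  | [], _, _ => []
  | s :: ss, cp, skip =>
    (if '-' ∈ s ∧ skip = false then [pairAt points cp] else []) ++ MS points ss (cp + 1) false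

-- structural model of Python's split('|')
def mySplit : List Char → List (List Char)
  | [] => [[]]
  | c :: cs =>
    if c = '|' then [] :: mySplit cs
    else
      match mySplit cs with
      | [] => [[c]]
      | h :: t => (c :: h) :: t

theorem mySplit_ne_nil (cs : List Char) : mySplit cs ≠ [] := by
  cases cs with
  | nil => simp [mySplit]
  | cons c cs =>
    simp only [mySplit]
    split
    · simp
    · split <;> simp

theorem foldA_eq_KA (points : List String) (cs : List Char)
    (acc : List (List String)) (cp : Int) (skip : Bool) :
    (cs.foldl (stepA points) (acc, cp, skip)).1 = acc ++ KA points cs cp skip := by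
  induction cs generalizing acc cp skip with
  | nil => simp [KA]
  | cons c cs ih =>
    simp only [List.foldl_cons, stepA, KA]
    by_cases h1 : c = '|'
    · simp [h1, ih]
    · by_cases h2 : c = '-' ∧ skip = false
      · simp [h2, ih, pairAt]
      · simp [h1, h2, ih]

theorem KA_eq_MS (points : List String) (cs : List Char) (cp : Int) (skip : Bool) :
    KA points cs cp skip = MS points (mySplit cs) cp skip := by
  induction cs generalizing cp skip with
  | nil => simp [mySplit, KA, MS]
  | cons c cs ih =>
    simp only [KA, mySplit]
    by_cases h1 : c = '|'
    · simp only [h1, ih]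
      simp [MS]
    · rcases hs : mySplit cs with _ | ⟨h, t⟩
      · exact absurd hs (mySplit_ne_nil cs)
      · by_cases h2 : c = '-' ∧ skip = false
        · simp only [if_neg h1, if_pos h2, ih, hs]
          simp [MS, h2.1, h2.2, pairAt]
        · simp only [if_neg h1, if_neg h2, ih, hs]
          cases skip with
          | true => simp [MS]
          | false =>
            have hc : ¬ ('-' = c) := fun e => h2 ⟨e.symm, rfl⟩
            by_cases hm : '-' ∈ h
            · simp [MS, hm, hc]
            · simp [MS, hm, hc]

theorem splitOn_go_eq (sep : List Char) (fuel : Nat) :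
    ∀ (cs cur : List Char) (acc : List (List Char)), cs.length < fuel → sep = ['|'] →
    PySem.Chars.splitOn.go sep fuel cs cur acc =
      acc.reverse ++ (mySplit cs).modifyHead (fun h => cur.reverse ++ h) := by
  induction fuel with
  | zero => intro cs cur acc h; omega
  | succ f ih =>
    intro cs cur acc h hsep
    subst hsep
    cases cs with
    | nil =>
      simp [PySem.Chars.splitOn.go, mySplit]
    | cons c rest =>
      rw [PySem.Chars.splitOn.go]
      by_cases hc : c = '|'
      · have hp : ['|'].isPrefixOf (c :: rest) = true := by simp [List.isPrefixOf, hc]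
        rw [if_pos hp]
        simp only [List.length_cons, List.length_nil, List.drop_succ_cons, List.drop_zero]
        rw [ih rest [] (cur.reverse :: acc) (by simp at h; omega) rfl]
        rcases hs : mySplit rest with _ | ⟨hd, tl⟩
        · exact absurd hs (mySplit_ne_nil rest)
        · simp [mySplit, hc, hs]
      · have hp : ¬ (['|'].isPrefixOf (c :: rest) = true) := by
          simp only [List.isPrefixOf, Bool.and_eq_true, beq_iff_eq, not_and]
          exact fun e => absurd e.symm hc
        rw [if_neg hp]
        rw [ih rest (c :: cur) acc (by simp at h; omega) rfl]
        rcases hs : mySplit rest with _ | ⟨hd, tl⟩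
        · exact absurd hs (mySplit_ne_nil rest)
        · simp [mySplit, hc, hs]

theorem splitOn_eq_mySplit (cs : List Char) :
    PySem.Chars.splitOn cs ['|'] = mySplit cs := by
  unfold PySem.Chars.splitOn
  rw [splitOn_go_eq ['|'] (cs.length + 1) cs [] [] (by omega) rfl]
  rcases hs : mySplit cs with _ | ⟨h, t⟩
  · exact absurd hs (mySplit_ne_nil cs)
  · simp

theorem mem_of_isIn (s : List Char) : PySem.Chars.isIn ['-'] s = ('-' ∈ s : Bool) := by
  by_cases h : '-' ∈ s
  · simp only [h, decide_true]
    rw [PySem.Chars.isIn_iff_infix]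
    obtain ⟨l1, l2, rfl⟩ := List.append_of_mem h
    exact ⟨l1, l2, by simp⟩
  · simp only [h, decide_false]
    rw [PySem.Chars.isIn_eq_false_iff]
    intro ⟨l1, l2, hl⟩
    exact h (by rw [← hl]; simp)

theorem alt_eq_MS (points : List String) (ss : List (List Char)) (j : Int) :
    ((PySem.List.enumerate ss j).filter (fun p => ('-' ∈ p.2 : Bool))).map
      (fun p => [PySem.List.pyGetD points (p.1 - 1) "", PySem.List.pyGetD points p.1 ""]) =
    MS points ss (j - 1) false := by
  induction ss generalizing j with
  | nil => simp [PySem.List.enumerate, MS]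
  | cons s ss ih =>
    rw [PySem.List.enumerate_cons]
    have e1 : j + 1 - 1 = j := by ring
    have e2 : j - 1 + 1 = j := by ring
    by_cases h : '-' ∈ s
    · simp only [List.filter_cons, h, decide_true, if_true, List.map_cons, MS, and_true]
      rw [ih (j + 1), e1, e2]
      simp [pairAt, e2]
    · simp only [List.filter_cons, h, decide_false, Bool.false_eq_true, if_false, MS, and_true]
      rw [ih (j + 1), e1, e2]
      simp

-- ===== VERDICT (by name: the statement is the Claim_ definition above) =====
theorem make_connections_spec : Claim_equal_make_connections := by
  intro line points _ _
  unfold Spec_make_connections make_connections make_connections_alt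
  rw [foldA_eq_KA, KA_eq_MS, splitOn_eq_mySplit]
  simp only [mem_of_isIn]
  rw [alt_eq_MS]
  norm_num
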